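-- pv_equiv track=rewrite | github.com/0xveya/cisco-conf-helper | cisco_conf_helper/backup.py | sanitize_config_output
-- ===== SOURCE A (Python) =====
-- def sanitize_config_output(text: str) -> str:
--     lines = text.splitlines()
--     start = 0
--
--     while start < len(lines):
--         line = lines[start].strip()
--         if (
--             not line
--             or line == "Building configuration..."
--             or line.startswith("Current configuration :")
--         ):
--             start += 1
--             continue
--         break
--
--     end = len(lines)
--     last_end_index = -1
--     for index, raw_line in enumerate(lines[start:], start=start):
--         if raw_line.strip() == "end":
--             last_end_index = index
--
--     if last_end_index >= 0:
--         end = last_end_index + 1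
--     else:
--         while end > start and not lines[end - 1].strip():
--             end -= 1
--
--     cleaned = "\n".join(lines[start:end]).strip()
--     return f"{cleaned}\n" if cleaned else ""
-- ===== SOURCE B (Python) =====
-- def sanitize_config_output(text: str) -> str:
--     committed, pending = [], []
--     in_header = True
--     for line in text.splitlines():
--         s = line.strip()
--         if in_header:
--             if not s or s == "Building configuration..." or s.startswith("Current configuration :"):
--                 continue
--             in_header = False
--         pending.append(line)
--         if s == "end":
--             committed += pending
--             pending = []
--     cleaned = "\n".join(committed or pending).strip()
--     return f"{cleaned}\n" if cleaned else ""
-- ===== Notes on version B (the rewrite author's own statement) =====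
-- stated objective: alternative
-- what changed: B replaces A's three staged index passes (header while-loop over an index, full scan recording the last terminator index, trailing-blank trim loop, then list slicing) with a single pass holding a committed/pending buffer pair that flushes the pending lines into committed at each terminator line, so no indices or slices exist at all and the trailing trim disappears (the final strip covers it).
import Mathlib
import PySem

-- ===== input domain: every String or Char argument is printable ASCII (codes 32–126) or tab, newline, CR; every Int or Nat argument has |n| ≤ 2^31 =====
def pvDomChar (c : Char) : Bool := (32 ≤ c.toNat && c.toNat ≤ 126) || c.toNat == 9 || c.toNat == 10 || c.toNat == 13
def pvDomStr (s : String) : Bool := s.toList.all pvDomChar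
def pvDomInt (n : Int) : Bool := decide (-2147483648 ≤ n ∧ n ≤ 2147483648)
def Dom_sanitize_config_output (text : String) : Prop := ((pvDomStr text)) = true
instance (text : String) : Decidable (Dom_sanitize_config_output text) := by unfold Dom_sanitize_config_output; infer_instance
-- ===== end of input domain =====

-- B replaces A's three index-based passes (header while-loop, full scan tracking the last
-- 'end' index, trailing-blank trim, then slicing) by ONE pass with a buffer-flush accumulator
-- and no indices or slices at all; objective: alternative.

-- ===== PORT A =====
-- header test A applies to the stripped line
def pvHdrA (line : String) : Bool :=
  let s := PySem.Str.strip line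
  s == "" || s == "Building configuration..." || PySem.Str.startswith s "Current configuration :"

-- A's leading while-loop: walks the lines keeping the running index `start`
def pvStartLoopA : List String → Nat → Nat
  | [], start => start
  | l :: rest, start => if pvHdrA l then pvStartLoopA rest (start + 1) else start

-- body of A's `for index, raw_line in enumerate(lines[start:], start=start)`: state = (last_end_index, index)
def pvStepA (p : Int × Nat) (raw : String) : Int × Nat :=
  (if PySem.Str.strip raw == "end" then (p.2 : Int) else p.1, p.2 + 1)

-- A's trailing `while end > start and not lines[end-1].strip(): end -= 1`
def pvTrimA (lines : List String) (start : Nat) : Nat → Nat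
  | 0 => 0
  | e + 1 =>
    if start < e + 1 && (PySem.Str.strip (lines.getD e "") == "") then pvTrimA lines start e
    else e + 1

def sanitize_config_output (text : String) : String :=
  let lines := PySem.Str.splitlines text
  let start := pvStartLoopA lines 0
  let last := ((PySem.List.slice lines (some (start : Int)) none).foldl pvStepA (-1, start)).1
  let end_ : Nat := if 0 ≤ last then last.toNat + 1 else pvTrimA lines start lines.length
  let cleaned := PySem.Str.strip
    (PySem.Str.join "\n" (PySem.List.slice lines (some (start : Int)) (some (end_ : Int))))
  if cleaned == "" then "" else cleaned ++ "\n"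

-- ===== PORT B =====
-- Source B's loop body: state = (in_header, committed, pending); a header line inside the header
-- is skipped (`continue`), otherwise the line joins `pending`, and a line stripping to "end"
-- flushes `pending` onto `committed`.
def pvStepB (st : Bool × List String × List String) (line : String) :
    Bool × List String × List String :=
  let s := PySem.Str.strip line
  if st.1 && (s == "" || s == "Building configuration..."
      || PySem.Str.startswith s "Current configuration :") then st
  else
    let pend := st.2.2 ++ [line]
    if s == "end" then (false, st.2.1 ++ pend, []) else (false, st.2.1, pend)

def sanitize_config_output_alt (text : String) : String :=
  let st := (PySem.Str.splitlines text).foldl pvStepB (true, [], [])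
  let kept := if st.2.1.isEmpty then st.2.2 else st.2.1   -- "committed or pending"
  let cleaned := PySem.Str.strip (PySem.Str.join "\n" kept)
  if cleaned == "" then "" else cleaned ++ "\n"

-- ===== PRECONDITION & SPEC =====
def Spec_sanitize_config_output (text : String) (out : String) : Prop := out = sanitize_config_output_alt text
instance (text : String) (out : String) : Decidable (Spec_sanitize_config_output text out) := by unfold Spec_sanitize_config_output; infer_instance

-- ===== CLAIM (what is proved, stated in full; the proofs are below) =====
def Claim_equal_sanitize_config_output : Prop := ∀ (text : String), Dom_sanitize_config_output text → Spec_sanitize_config_output text (sanitize_config_output text)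

-- ===== LEMMAS AND PROOFS =====

-- B's processing step once the header is over (flag false): pure buffer-flush step
def pvProcB (p : List String × List String) (line : String) : List String × List String :=
  if PySem.Str.strip line == "end" then (p.1 ++ p.2 ++ [line], []) else (p.1, p.2 ++ [line])

theorem pvProcB_end (c p : List String) (x : String) (h : (PySem.Str.strip x == "end") = true) :
    pvProcB (c, p) x = (c ++ p ++ [x], []) := by simp [pvProcB, h]

theorem pvProcB_notend (c p : List String) (x : String)
    (h : (PySem.Str.strip x == "end") = false) :
    pvProcB (c, p) x = (c, p ++ [x]) := by simp [pvProcB, h]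

theorem pvStepB_false (p : List String × List String) (line : String) :
    pvStepB (false, p) line = (false, pvProcB p line) := by
  rcases p with ⟨c, pd⟩
  by_cases h : (PySem.Str.strip line == "end") = true <;> simp [pvStepB, pvProcB, h]

theorem pvFoldB_false (l : List String) (p : List String × List String) :
    l.foldl pvStepB (false, p) = (false, l.foldl pvProcB p) := by
  induction l generalizing p with
  | nil => rfl
  | cons x xs ih => rw [List.foldl_cons, pvStepB_false, List.foldl_cons, ih]

theorem pvStepB_header (line : String) (h : pvHdrA line = true) :
    pvStepB (true, [], []) line = (true, [], []) := by
  unfold pvHdrA at h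
  simp only [pvStepB]
  rw [if_pos]
  simpa using h

theorem pvStepB_nonheader (line : String) (h : pvHdrA line = false) :
    pvStepB (true, [], []) line = (false, pvProcB ([], []) line) := by
  have h' : (PySem.Str.strip line == "" || PySem.Str.strip line == "Building configuration..."
      || PySem.Str.startswith (PySem.Str.strip line) "Current configuration :") = false := by
    simpa [pvHdrA] using h
  simp only [pvStepB, pvProcB, Bool.true_and]
  rw [if_neg (fun hc => by rw [h'] at hc; exact Bool.false_ne_true hc)]
  by_cases hx : (PySem.Str.strip line == "end") = true <;> simp [hx]

theorem pvFoldB_headers (hd body : List String) (h : ∀ x ∈ hd, pvHdrA x = true) :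
    (hd ++ body).foldl pvStepB (true, [], []) = body.foldl pvStepB (true, [], []) := by
  induction hd with
  | nil => rfl
  | cons x xs ih =>
    rw [List.cons_append, List.foldl_cons, pvStepB_header x (h x (by simp))]
    exact ih (fun y hy => h y (by simp [hy]))

theorem pvStart_eq (ls : List String) (s : Nat) :
    pvStartLoopA ls s = s + ls.findIdx (fun l => !pvHdrA l) := by
  induction ls generalizing s with
  | nil => simp [pvStartLoopA]
  | cons l rest ih =>
    by_cases h : pvHdrA l = true
    · simp [pvStartLoopA, List.findIdx_cons, h, ih]; omega
    · simp [pvStartLoopA, List.findIdx_cons, h]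

theorem pvFoldl_snd (l : List String) (a : Int) (s : Nat) :
    (l.foldl pvStepA (a, s)).2 = s + l.length := by
  induction l generalizing a s with
  | nil => simp
  | cons x xs ih => simp only [List.foldl_cons, pvStepA, ih]; simp; omega

theorem pvFoldl_fst_append (l : List String) (x : String) (a : Int) (s : Nat) :
    ((l ++ [x]).foldl pvStepA (a, s)).1 =
      if PySem.Str.strip x == "end" then ((s + l.length : Nat) : Int)
      else (l.foldl pvStepA (a, s)).1 := by
  rw [List.foldl_append]
  simp only [List.foldl_cons, List.foldl_nil, pvStepA]
  split <;> simp [pvFoldl_snd]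

-- invariant: pvProcB only moves lines around, committed ++ pending grows by the input
theorem pvProcB_inv (l : List String) (c p : List String) :
    (l.foldl pvProcB (c, p)).1 ++ (l.foldl pvProcB (c, p)).2 = c ++ p ++ l := by
  induction l generalizing c p with
  | nil => simp
  | cons x xs ih =>
    rw [List.foldl_cons]
    by_cases hx : (PySem.Str.strip x == "end") = true
    · rw [pvProcB_end c p x hx, ih]; simp
    · rw [pvProcB_notend c p x (by simpa using hx), ih]; simp

-- joint induction (from the back) relating A's last-'end'-index fold and B's buffer-flush fold
theorem pvBothRel (l : List String) (s : Nat) :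
    ((l.foldl pvStepA (-1, s)).1 = -1 ∧ l.foldl pvProcB ([], []) = ([], l))
    ∨ ∃ j, j < l.length ∧ (l.foldl pvStepA (-1, s)).1 = ((s + j : Nat) : Int) ∧
        (l.foldl pvProcB ([], [])).1 = l.take (j + 1) := by
  induction l using List.reverseRecOn with
  | nil => left; exact ⟨rfl, rfl⟩
  | append_singleton l x ih =>
    have hproc : (l ++ [x]).foldl pvProcB ([], [])
        = pvProcB (l.foldl pvProcB ([], [])) x := by
      rw [List.foldl_append]; rfl
    cases hx : (PySem.Str.strip x == "end") with
    | true =>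
      right
      refine ⟨l.length, by simp, ?_, ?_⟩
      · rw [pvFoldl_fst_append, hx]; simp
      · rw [hproc, show l.foldl pvProcB ([], [])
            = ((l.foldl pvProcB ([], [])).1, (l.foldl pvProcB ([], [])).2) from rfl,
          pvProcB_end _ _ _ hx]
        show (l.foldl pvProcB ([], [])).1 ++ (l.foldl pvProcB ([], [])).2 ++ [x]
            = (l ++ [x]).take (l.length + 1)
        have hinv := pvProcB_inv l [] []
        simp only [List.nil_append] at hinv
        rw [hinv, List.take_of_length_le (by simp)]
    | false =>
      have hfst : ((l ++ [x]).foldl pvStepA (-1, s)).1 = (l.foldl pvStepA (-1, s)).1 := by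
        rw [pvFoldl_fst_append, hx]; simp
      rcases ih with ⟨h1, h2⟩ | ⟨j, hj, h1, h2⟩
      · left
        refine ⟨by rw [hfst, h1], ?_⟩
        rw [hproc, h2, pvProcB_notend _ _ _ hx]
      · right
        refine ⟨j, by simp; omega, by rw [hfst, h1], ?_⟩
        rw [hproc, show l.foldl pvProcB ([], [])
            = ((l.foldl pvProcB ([], [])).1, (l.foldl pvProcB ([], [])).2) from rfl,
          pvProcB_notend _ _ _ hx]
        simpa [List.take_append, Nat.sub_eq_zero_of_le (by omega : j + 1 ≤ l.length)] using h2

theorem pvTrim_spec (lines : List String) (k : Nat) :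
    ∀ e, k ≤ e →
      k ≤ pvTrimA lines k e ∧ pvTrimA lines k e ≤ e ∧
      ∀ i, pvTrimA lines k e ≤ i → i < e → (PySem.Str.strip (lines.getD i "") == "") = true := by
  intro e
  induction e with
  | zero =>
    intro h
    refine ⟨by simpa [pvTrimA] using h, by simp [pvTrimA], ?_⟩
    intro i _ hi; omega
  | succ e ih =>
    intro h
    by_cases hc : (decide (k < e + 1) && (PySem.Str.strip (lines.getD e "") == "")) = true
    · have hk : k ≤ e := by
        have := (Bool.and_eq_true _ _).mp hc
        have := of_decide_eq_true this.1
        omega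
      have hblank : (PySem.Str.strip (lines.getD e "") == "") = true :=
        ((Bool.and_eq_true _ _).mp hc).2
      have heq : pvTrimA lines k (e + 1) = pvTrimA lines k e := by
        simp only [pvTrimA, hc, if_true]
      obtain ⟨h1, h2, h3⟩ := ih hk
      refine ⟨by omega, by omega, ?_⟩
      intro i hti hlt
      rcases Nat.lt_or_ge i e with hie | hie
      · exact h3 i (by omega) hie
      · have : i = e := by omega
        subst this; exact hblank
    · have heq : pvTrimA lines k (e + 1) = e + 1 := by
        simp only [pvTrimA, hc, if_false, Bool.false_eq_true]
      refine ⟨by omega, by omega, ?_⟩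
      intro i hti hlt; omega

theorem pvDropWhile_append {α : Type} (p : α → Bool) (l1 l2 : List α) :
    (l1 ++ l2).dropWhile p = if l1.all p then l2.dropWhile p else l1.dropWhile p ++ l2 := by
  induction l1 with
  | nil => simp
  | cons a l ih =>
    by_cases h : p a <;> simp [h, ih]

theorem pvStrip_append_space (a w : List Char) (hw : w.all PySem.Chars.isspace = true) :
    PySem.Chars.strip (a ++ w) = PySem.Chars.strip a := by
  unfold PySem.Chars.strip PySem.Chars.lstrip PySem.Chars.rstrip
  by_cases ha : a.all PySem.Chars.isspace = true
  · have h1 : (a ++ w).dropWhile PySem.Chars.isspace = [] := by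
      rw [pvDropWhile_append, if_pos ha, List.dropWhile_eq_nil_iff]
      intro x hx; exact (List.all_eq_true.mp hw) x hx
    have h2 : a.dropWhile PySem.Chars.isspace = [] := by
      rw [List.dropWhile_eq_nil_iff]
      intro x hx; exact (List.all_eq_true.mp ha) x hx
    rw [h1, h2]
  · rw [pvDropWhile_append, if_neg ha]
    rw [List.reverse_append, pvDropWhile_append, if_pos (by simpa using hw)]

theorem pvStrip_nil_all_space (b : List Char) (h : PySem.Chars.strip b = []) :
    b.all PySem.Chars.isspace = true := by
  unfold PySem.Chars.strip PySem.Chars.lstrip PySem.Chars.rstrip at h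
  have h1 : ((b.dropWhile PySem.Chars.isspace).reverse.dropWhile PySem.Chars.isspace) = [] := by
    have := congrArg List.reverse h
    simpa using this
  rw [List.dropWhile_eq_nil_iff] at h1
  rw [List.all_eq_true]
  intro x hx
  rcases List.mem_append.mp ((List.takeWhile_append_dropWhile
      (p := PySem.Chars.isspace) (l := b)) ▸ hx) with h' | h'
  · exact List.mem_takeWhile_imp h'
  · exact h1 x (by simpa using h')

theorem pvJoin_append_singleton (sep b x : List Char) (xs : List (List Char)) :
    PySem.Chars.join sep (x :: (xs ++ [b])) = PySem.Chars.join sep (x :: xs) ++ sep ++ b := by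
  induction xs generalizing x with
  | nil => simp [PySem.Chars.join, List.intercalate]
  | cons y ys ih =>
    show PySem.Chars.join sep (x :: y :: (ys ++ [b])) = _
    rw [PySem.Chars.join_cons_cons, ih y, PySem.Chars.join_cons_cons]
    simp [List.append_assoc]

theorem pvJoin_strip_blanks (sep : List Char) (hsep : sep.all PySem.Chars.isspace = true)
    (bs : List (List Char)) (hb : ∀ b ∈ bs, PySem.Chars.strip b = []) (l : List (List Char)) :
    PySem.Chars.strip (PySem.Chars.join sep (l ++ bs)) = PySem.Chars.strip (PySem.Chars.join sep l) := by
  induction bs using List.reverseRecOn with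
  | nil => simp
  | append_singleton bs b ih =>
    have hb' : ∀ b' ∈ bs, PySem.Chars.strip b' = [] := fun b' h' => hb b' (by simp [h'])
    have hbb : PySem.Chars.strip b = [] := hb b (by simp)
    have hbsp : b.all PySem.Chars.isspace = true := pvStrip_nil_all_space b hbb
    rw [← List.append_assoc]
    cases hlb : l ++ bs with
    | nil =>
      obtain ⟨hl, hbs⟩ := List.append_eq_nil_iff.mp hlb
      subst hl; subst hbs
      have : PySem.Chars.join sep [b] = b := by simp [PySem.Chars.join, List.intercalate]
      simp only [List.nil_append, this, PySem.Chars.join_nil]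
      rw [hbb]
      rfl
    | cons x xs =>
      rw [List.cons_append, pvJoin_append_singleton, List.append_assoc,
        pvStrip_append_space _ _ (by simp [List.all_append, hsep, hbsp]), ← hlb]
      exact ih hb'

theorem pvStr_join_strip (l bs : List String)
    (hb : ∀ b ∈ bs, (PySem.Str.strip b == "") = true) :
    PySem.Str.strip (PySem.Str.join "\n" (l ++ bs)) = PySem.Str.strip (PySem.Str.join "\n" l) := by
  apply String.toList_inj.mp
  rw [PySem.Str.toList_strip, PySem.Str.toList_strip, PySem.Str.toList_join, PySem.Str.toList_join,
    List.map_append]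
  apply pvJoin_strip_blanks _ (by decide)
  intro b' hb'
  obtain ⟨b, hbm, rfl⟩ := List.mem_map.mp hb'
  have hs : PySem.Str.strip b = "" := eq_of_beq (hb b hbm)
  rw [← PySem.Str.toList_strip, hs]
  rfl

theorem pvMain (text : String) : sanitize_config_output text = sanitize_config_output_alt text := by
  unfold sanitize_config_output sanitize_config_output_alt
  set lines := PySem.Str.splitlines text with hlines
  set k := lines.findIdx (fun l => !pvHdrA l) with hk
  have hkn : k ≤ lines.length := List.findIdx_le_length
  have hstart : pvStartLoopA lines 0 = k := by rw [pvStart_eq]; omega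
  have hpre : ∀ x ∈ lines.take k, pvHdrA x = true := by
    intro x hx
    obtain ⟨i, hi, rfl⟩ := List.mem_iff_getElem.mp hx
    have hik : i < k := by
      have := hi; rw [List.length_take] at this; omega
    have hlt : i < lines.length := by omega
    have := List.not_of_lt_findIdx (p := fun l => !pvHdrA l) (xs := lines) (i := i) (by omega)
    rw [List.getElem_take]
    simpa using this
  have hslice_from : PySem.List.slice lines (some (k : Int)) none = lines.drop k :=
    PySem.List.slice_from_natCast lines k
  have hsplit : lines = lines.take k ++ lines.drop k := (List.take_append_drop k lines).symm
  -- B's fold over all the lines = the buffer-flush fold over the body lines.drop k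
  have hfoldB : lines.foldl pvStepB (true, [], [])
      = if (lines.drop k).isEmpty then ((true, [], []) : Bool × List String × List String)
        else (false, (lines.drop k).foldl pvProcB ([], [])) := by
    conv_lhs => rw [hsplit]
    rw [pvFoldB_headers _ _ hpre]
    cases hbody : lines.drop k with
    | nil => simp
    | cons b rest =>
      have hklt : k < lines.length := by
        by_contra hge
        have h0 : lines.drop k = [] := List.drop_eq_nil_of_le (by omega)
        rw [h0] at hbody
        exact List.cons_ne_nil b rest hbody.symm
      have hfind : (fun l => !pvHdrA l) lines[k] = true :=
        List.findIdx_getElem (w := hklt)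
      have hh : (lines.drop k).head? = some b := by rw [hbody]; rfl
      rw [List.head?_drop] at hh
      have hb : b = lines[k] := by
        have h2 : lines[k]? = some lines[k] := List.getElem?_eq_getElem hklt
        rw [hh] at h2
        exact Option.some_inj.mp h2
      have hbk : pvHdrA b = false := by rw [hb]; simpa using hfind
      rw [List.foldl_cons, pvStepB_nonheader b hbk, pvFoldB_false]
      simp [List.foldl_cons]
  simp only [hstart, hslice_from, hfoldB]
  by_cases hE : (lines.drop k).isEmpty = true
  · -- empty body: both sides produce ""
    rw [if_pos hE]
    have hnil : lines.drop k = [] := List.isEmpty_iff.mp hE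
    have hkl : lines.length ≤ k := by
      have := List.drop_eq_nil_iff.mp hnil; omega
    obtain ⟨htk, htn, _⟩ := pvTrim_spec lines k lines.length hkn
    have ht : pvTrimA lines k lines.length = k := by omega
    have hsA : PySem.List.slice lines (some (k : Int)) (some (k : Int))
        = (lines.drop k).take (k - k) := PySem.List.slice_natCast lines k k
    rw [hnil]
    simp only [List.foldl_nil]
    rw [if_neg (by omega : ¬ ((0:Int) ≤ -1)), ht, hsA, hnil]
    simp
  · rw [if_neg hE]
    rcases pvBothRel (lines.drop k) k with ⟨h1, h2⟩ | ⟨j, hj, h1, h2⟩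
    · -- no 'end' line: A trims trailing blanks, B keeps them; the final strip equalises
      rw [h1, h2, if_neg (by omega : ¬ ((0:Int) ≤ -1))]
      simp only [List.isEmpty_nil, if_true]
      set t := pvTrimA lines k lines.length with ht
      obtain ⟨htk, htn, hblank⟩ := pvTrim_spec lines k lines.length hkn
      rw [← ht] at htk htn hblank
      have hsA : PySem.List.slice lines (some (k : Int)) (some (t : Int))
          = (lines.drop k).take (t - k) := PySem.List.slice_natCast lines k t
      have hdecomp : lines.drop k = (lines.drop k).take (t - k) ++ lines.drop t := by
        conv_lhs => rw [← List.take_append_drop (t - k) (lines.drop k)]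
        rw [List.drop_drop, show k + (t - k) = t by omega]
      have hbs : ∀ b ∈ lines.drop t, (PySem.Str.strip b == "") = true := by
        intro b hbm
        obtain ⟨i, hi, rfl⟩ := List.mem_iff_getElem.mp hbm
        have hin : t + i < lines.length := by
          rw [List.length_drop] at hi; omega
        have hget : (lines.drop t)[i] = lines.getD (t + i) "" := by
          rw [List.getElem_drop, List.getD_eq_getElem lines "" hin]
        rw [hget]
        exact hblank (t + i) (by omega) hin
      rw [hsA]
      conv_rhs => rw [hdecomp]
      rw [pvStr_join_strip _ _ hbs]
    · -- an 'end' line exists: A slices to last+1, B has flushed exactly those lines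
      have hne : ((lines.drop k).take (j + 1)).isEmpty = false := by
        cases htk : (lines.drop k).take (j + 1) with
        | nil =>
          exfalso
          have hlen := congrArg List.length htk
          rw [List.length_take] at hlen
          simp only [List.length_nil] at hlen
          rcases Nat.min_eq_zero_iff.mp hlen with h | h <;> omega
        | cons a as => rfl
      rw [h1, if_pos (Int.natCast_nonneg _)]
      simp only [h2, hne, Bool.false_eq_true, if_false]
      have htn2 : ((((k + j : Nat) : Int)).toNat + 1 : Nat) = k + j + 1 := by omega
      rw [htn2]
      have hsA : PySem.List.slice lines (some (k : Int)) (some ((k + j + 1 : Nat) : Int))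
          = (lines.drop k).take (k + j + 1 - k) := PySem.List.slice_natCast lines k (k + j + 1)
      rw [hsA, show k + j + 1 - k = j + 1 by omega]

-- ===== VERDICT (by name: the statement is the Claim_ definition above) =====
theorem sanitize_config_output_spec : Claim_equal_sanitize_config_output := by
  intro text _
  unfold Spec_sanitize_config_output
  exact pvMain text
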